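-- pv_equiv track=rewrite | github.com/VincentYChia/Game-1 | Game-1-modular/world_system/world_memory/tag_assignment.py | _merge_origin_tags
-- ===== SOURCE A (Python) =====
-- from typing import Any, Dict, List, Optional, Set, Tuple
--
-- def _merge_origin_tags(origin_event_tags: List[List[str]]) -> List[str]:
--     """Merge tags from multiple origin events, preserving order by frequency.
--
--     Tags that appear in more origin events come first (more representative).
--     Within same frequency, order of first appearance is preserved.
--     """
--     tag_count: Dict[str, int] = {}
--     tag_first_seen: Dict[str, int] = {}
--     idx = 0
--
--     for event_tags in origin_event_tags:
--         for tag in event_tags: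
--             tag_count[tag] = tag_count.get(tag, 0) + 1
--             if tag not in tag_first_seen:
--                 tag_first_seen[tag] = idx
--                 idx += 1
--
--     # Sort by frequency (desc) then first appearance (asc)
--     sorted_tags = sorted(
--         tag_count.keys(),
--         key=lambda t: (-tag_count[t], tag_first_seen[t])
--     )
--     return sorted_tags
-- ===== SOURCE B (Python) =====
-- from typing import Dict, List
--
--
-- def _merge_origin_tags(origin_event_tags: List[List[str]]) -> List[str]:
--     """Merge tags from multiple origin events, preserving order by frequency.
--
--     Bucket variant: count tag frequencies in one pass (dict insertion order =
--     first-appearance order), group tags into buckets indexed by their count,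
--     then concatenate the buckets from the highest count down to 1.
--     """
--     counts: Dict[str, int] = {}
--     for event_tags in origin_event_tags:
--         for tag in event_tags:
--             counts[tag] = counts.get(tag, 0) + 1
--     buckets: Dict[int, List[str]] = {}
--     for tag, c in counts.items():
--         buckets.setdefault(c, []).append(tag)
--     result: List[str] = []
--     for c in range(max(counts.values(), default=0), 0, -1):
--         result.extend(buckets.get(c, []))
--     return result
-- ===== Notes on version B (the rewrite author's own statement) =====
-- stated objective: faster
-- what changed: Replaces the comparison sort keyed by (-count, first-seen index) with a counting/bucket pass: tags are appended to buckets indexed by their frequency in first-appearance order and the buckets are concatenated from the maximum count down to 1.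
import Mathlib
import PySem

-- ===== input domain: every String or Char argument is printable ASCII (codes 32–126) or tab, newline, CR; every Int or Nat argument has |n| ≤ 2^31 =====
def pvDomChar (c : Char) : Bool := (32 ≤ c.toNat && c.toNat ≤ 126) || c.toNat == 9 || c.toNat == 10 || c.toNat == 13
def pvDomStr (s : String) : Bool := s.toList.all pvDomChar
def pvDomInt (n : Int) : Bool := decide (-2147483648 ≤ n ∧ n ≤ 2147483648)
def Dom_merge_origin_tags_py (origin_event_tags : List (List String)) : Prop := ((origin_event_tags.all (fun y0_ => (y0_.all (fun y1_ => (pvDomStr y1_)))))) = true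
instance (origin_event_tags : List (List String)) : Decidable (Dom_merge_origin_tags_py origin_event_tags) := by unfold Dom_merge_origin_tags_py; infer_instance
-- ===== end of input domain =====

-- B replaces A's comparison sort keyed by (-count, first-seen index) with frequency buckets
-- filled in first-appearance order and concatenated from the highest count down (measured faster in a timing run).

-- ===== PORT A =====
def merge_origin_tags_py (origin_event_tags : List (List String)) : List String :=
  -- state: (tag_count, (tag_first_seen, idx))
  let st :=
    origin_event_tags.foldl
      (fun st event_tags =>
        event_tags.foldl
          (fun (st : PySem.Dict String Int × (PySem.Dict String Int × Int)) tag =>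
            (st.1.insert tag (st.1.getD tag 0 + 1),
             if st.2.1.contains tag then st.2 else (st.2.1.insert tag st.2.2, st.2.2 + 1)))
          st)
      (PySem.Dict.empty, (PySem.Dict.empty, 0))
  PySem.List.sorted2 st.1.keys (fun t => -(st.1.getD t 0)) (fun t => st.2.1.getD t 0)

-- ===== PORT B =====
def merge_origin_tags_py_alt (origin_event_tags : List (List String)) : List String :=
  let counts : PySem.Dict String Int :=
    origin_event_tags.foldl
      (fun counts event_tags =>
        event_tags.foldl (fun (counts : PySem.Dict String Int) tag =>
          counts.insert tag (counts.getD tag 0 + 1)) counts)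
      PySem.Dict.empty
  let buckets : PySem.Dict Int (List String) :=
    counts.items.foldl (fun b p => b.insert p.2 (b.getD p.2 [] ++ [p.1])) PySem.Dict.empty
  (PySem.List.pyRange ((PySem.List.max? counts.values (fun v => v)).getD 0) 0 (-1)).foldl
    (fun result c => result ++ buckets.getD c []) []

-- ===== PRECONDITION & SPEC =====
def Spec_merge_origin_tags_py (origin_event_tags : List (List String)) (out : List String) : Prop := out = merge_origin_tags_py_alt origin_event_tags
instance (origin_event_tags : List (List String)) (out : List String) : Decidable (Spec_merge_origin_tags_py origin_event_tags out) := by unfold Spec_merge_origin_tags_py; infer_instance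

-- ===== CLAIM (what is proved, stated in full; the proofs are below) =====
def Claim_equal_merge_origin_tags_py : Prop := ∀ (origin_event_tags : List (List String)), Dom_merge_origin_tags_py origin_event_tags → Spec_merge_origin_tags_py origin_event_tags (merge_origin_tags_py origin_event_tags)

-- ===== LEMMAS AND PROOFS =====

-- `insertBy` inserts in front of the first element it goes `before`.
theorem pv_insertBy_eq_append {α : Type} (before : α → α → Bool) (x : α) (l r : List α)
    (h1 : ∀ y ∈ l, before x y = false) (h2 : ∀ y, r.head? = some y → before x y = true) :
    PySem.List.insertBy before x (l ++ r) = l ++ x :: r := by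
  induction l with
  | nil =>
    cases r with
    | nil => simp [PySem.List.insertBy]
    | cons y ys => simp [PySem.List.insertBy, h2 y rfl]
  | cons a l ih =>
    have ha : before x a = false := h1 a (by simp)
    simp only [List.cons_append, PySem.List.insertBy, ha, Bool.false_eq_true, if_false]
    exact congrArg (a :: ·) (ih (fun y hy => h1 y (by simp [hy])))

-- a strictly-`before`-increasing rearrangement is what the insertion-sort fold returns
theorem pv_foldl_insertBy_eq {α : Type} [DecidableEq α] (before : α → α → Bool) (xs ys : List α)
    (hp : ys.Perm xs)
    (hpw : ys.Pairwise (fun a b => before a b = true ∧ before b a = false)) :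
    xs.foldl (fun acc x => PySem.List.insertBy before x acc) [] = ys := by
  have hnd : ys.Nodup := hpw.imp (by
    rintro a b ⟨h1, h2⟩ rfl
    rw [h1] at h2; cases h2)
  suffices h : ∀ (zs acc : List α), acc.Sublist ys → (acc ++ zs).Perm ys →
      zs.foldl (fun acc x => PySem.List.insertBy before x acc) acc = ys by
    exact h xs [] (List.nil_sublist ys) (by simpa using hp.symm)
  intro zs
  induction zs with
  | nil =>
    intro acc hs hperm
    exact hs.eq_of_length (by simpa using hperm.length_eq)
  | cons x zs ih =>
    intro acc hs hperm
    have hx : x ∈ ys := hperm.mem_iff.mp (by simp)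
    have hxacc : x ∉ acc := by
      intro hxa
      have h1 : 1 ≤ acc.count x := List.one_le_count_iff.mpr hxa
      have h2 : (acc ++ x :: zs).count x = ys.count x := hperm.count_eq x
      have h3 : ys.count x ≤ 1 := List.nodup_iff_count_le_one.mp hnd x
      simp [List.count_append] at h2
      omega
    obtain ⟨u, v, rfl⟩ := List.append_of_mem hx
    have hxu : x ∉ u := by
      have hnd' := hnd
      rw [List.nodup_append] at hnd'
      exact fun hxu => hnd'.2.2 x hxu x (by simp) rfl
    rw [List.sublist_append_iff] at hs
    obtain ⟨a1, a2, rfl, ha1, ha2⟩ := hs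
    have hxa2 : x ∉ a2 := fun h => hxacc (by simp [h])
    have ha2v : a2.Sublist v := by
      rcases List.sublist_cons_iff.mp ha2 with h | ⟨r, rfl, _⟩
      · exact h
      · exact absurd (by simp) hxa2
    have hpw' := hpw
    rw [List.pairwise_append] at hpw'
    obtain ⟨hpu, hpxv, hcross⟩ := hpw'
    have hbefore1 : ∀ y ∈ a1, before x y = false := by
      intro y hy
      exact (hcross y (ha1.mem hy) x (by simp)).2
    have hbefore2 : ∀ y, a2.head? = some y → before x y = true := by
      intro y hy
      have hyv : y ∈ v := ha2v.mem (List.mem_of_mem_head? hy)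
      exact ((List.pairwise_cons.mp hpxv).1 y hyv).1
    rw [show ∀ (f : List α → α → List α), List.foldl f (a1 ++ a2) (x :: zs) = List.foldl f (f (a1 ++ a2) x) zs from fun f => rfl]
    rw [pv_insertBy_eq_append before x a1 a2 hbefore1 hbefore2]
    apply ih
    · exact ha1.append (ha2v.cons₂ x)
    · refine List.Perm.trans ?_ hperm
      have h1 : (a1 ++ x :: a2) ++ zs = a1 ++ (x :: (a2 ++ zs)) := by simp
      have h2 : (a1 ++ a2) ++ x :: zs = a1 ++ (a2 ++ x :: zs) := by simp
      rw [h1, h2]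
      exact List.Perm.append_left a1 List.perm_middle.symm

-- first_seen keys are the distinct tags in first-appearance order
theorem pv_fs_keys (ys : List String) :
    (ys.foldl (fun (p : PySem.Dict String Int × Int) tag =>
        if p.1.contains tag then p else (p.1.insert tag p.2, p.2 + 1))
      (PySem.Dict.empty, 0)).1.keys = PySem.Set.ofList ys := by
  induction ys using List.reverseRecOn with
  | nil => simp [PySem.Set.ofList]
  | append_singleton s x ih =>
    rw [List.foldl_append, List.foldl_cons, List.foldl_nil, PySem.Set.ofList_append_singleton]
    by_cases hmem : x ∈ PySem.Set.ofList s
    · have hc : (s.foldl (fun (p : PySem.Dict String Int × Int) tag =>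
          if p.1.contains tag then p else (p.1.insert tag p.2, p.2 + 1))
        (PySem.Dict.empty, 0)).1.contains x = true := by
        rw [PySem.Dict.contains_iff_mem_keys, ih]; exact hmem
      rw [if_pos hc, PySem.Set.add_of_mem hmem, ih]
    · have hc : (s.foldl (fun (p : PySem.Dict String Int × Int) tag =>
          if p.1.contains tag then p else (p.1.insert tag p.2, p.2 + 1))
        (PySem.Dict.empty, 0)).1.contains x = false := by
        rw [Bool.eq_false_iff]
        exact fun h => hmem (ih ▸ (PySem.Dict.contains_iff_mem_keys _ _).mp h)
      rw [if_neg (by simp [hc]), PySem.Set.add_of_not_mem hmem,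
        PySem.Dict.keys_insert_of_not_contains _ _ hc, ih]

-- the running first_seen index equals the number of distinct tags seen
theorem pv_fs_len (ys : List String) :
    (ys.foldl (fun (p : PySem.Dict String Int × Int) tag =>
        if p.1.contains tag then p else (p.1.insert tag p.2, p.2 + 1))
      (PySem.Dict.empty, 0)).2 = ((PySem.Set.ofList ys).length : Int) := by
  induction ys using List.reverseRecOn with
  | nil => simp [PySem.Set.ofList]
  | append_singleton s x ih =>
    rw [List.foldl_append, List.foldl_cons, List.foldl_nil, PySem.Set.ofList_append_singleton]
    by_cases hmem : x ∈ PySem.Set.ofList s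
    · have hc : (s.foldl (fun (p : PySem.Dict String Int × Int) tag =>
          if p.1.contains tag then p else (p.1.insert tag p.2, p.2 + 1))
        (PySem.Dict.empty, 0)).1.contains x = true := by
        rw [PySem.Dict.contains_iff_mem_keys, pv_fs_keys]; exact hmem
      rw [if_pos hc, PySem.Set.add_of_mem hmem, ih]
    · have hc : (s.foldl (fun (p : PySem.Dict String Int × Int) tag =>
          if p.1.contains tag then p else (p.1.insert tag p.2, p.2 + 1))
        (PySem.Dict.empty, 0)).1.contains x = false := by
        rw [Bool.eq_false_iff]
        exact fun h => hmem (pv_fs_keys s ▸ (PySem.Dict.contains_iff_mem_keys _ _).mp h)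
      rw [if_neg (by simp [hc]), PySem.Set.add_of_not_mem hmem]
      simp [ih]

-- first_seen invariant: the stored index is the position in first-appearance order
theorem pv_fs_inv (xs : List String) :
    ∀ (i : Nat) (t : String), (PySem.Set.ofList xs)[i]? = some t →
      (xs.foldl (fun (p : PySem.Dict String Int × Int) tag =>
          if p.1.contains tag then p else (p.1.insert tag p.2, p.2 + 1))
        (PySem.Dict.empty, 0)).1.getD t 0 = i := by
  induction xs using List.reverseRecOn with
  | nil => intro i t h; simp [PySem.Set.ofList] at h
  | append_singleton s x ih =>
    rw [List.foldl_append, List.foldl_cons, List.foldl_nil, PySem.Set.ofList_append_singleton]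
    set st := s.foldl (fun (p : PySem.Dict String Int × Int) tag =>
        if p.1.contains tag then p else (p.1.insert tag p.2, p.2 + 1))
      (PySem.Dict.empty, 0) with hst
    by_cases hmem : x ∈ PySem.Set.ofList s
    · have hc : st.1.contains x = true := by
        rw [PySem.Dict.contains_iff_mem_keys, hst, pv_fs_keys]; exact hmem
      rw [if_pos hc, PySem.Set.add_of_mem hmem]
      exact ih
    · have hc : st.1.contains x = false := by
        rw [Bool.eq_false_iff]
        exact fun h => hmem ((pv_fs_keys s).symm ▸ (PySem.Dict.contains_iff_mem_keys _ _).mp h)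
      rw [if_neg (by simp [hc]), PySem.Set.add_of_not_mem hmem]
      have hidx : st.2 = ((PySem.Set.ofList s).length : Int) := pv_fs_len s
      intro i t ht
      rcases Nat.lt_trichotomy i (PySem.Set.ofList s).length with hlt | heq | hgt
      · rw [List.getElem?_append_left hlt] at ht
        have htm : t ∈ PySem.Set.ofList s := List.mem_of_getElem? ht
        have hne : t ≠ x := fun h => hmem (h ▸ htm)
        rw [PySem.Dict.getD_insert_of_ne _ _ _ hne]
        exact ih i t ht
      · subst heq
        rw [List.getElem?_append_right (le_refl _)] at ht
        simp at ht
        subst ht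
        rw [PySem.Dict.getD_insert_self, hidx]
      · rw [List.getElem?_append_right (by omega)] at ht
        have : i - (PySem.Set.ofList s).length < 1 := by
          by_contra h
          rw [List.getElem?_eq_none (by simp; omega)] at ht
          cases ht
        omega

-- each bucket is the list of tags of that exact count, in first-appearance order
theorem pv_buckets_getD (xs : List String) (c : Int) :
    ((PySem.Dict.counter xs).items.foldl
        (fun (b : PySem.Dict Int (List String)) p => b.insert p.2 (b.getD p.2 [] ++ [p.1]))
        PySem.Dict.empty).getD c []
      = (PySem.Set.ofList xs).filter (fun t => ((xs.count t : Int) == c)) := by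
  have h1 : ((PySem.Dict.counter xs).items.foldl
        (fun (b : PySem.Dict Int (List String)) p => b.insert p.2 (b.getD p.2 [] ++ [p.1]))
        PySem.Dict.empty)
      = (((PySem.Dict.counter xs).items.map (fun p => (p.2, p.1))).foldl
        (fun (b : PySem.Dict Int (List String)) q => b.modify q.1 [] (· ++ [q.2]))
        PySem.Dict.empty) := by
    rw [List.foldl_map]; rfl
  rw [h1, PySem.Dict.getD_foldl_modify_append]
  simp [PySem.Dict.items_counter, List.map_map, List.filter_map, Function.comp_def]

-- B's result, characterised: buckets of equal-count tags, highest count first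
theorem pv_alt_eq_flatMap (o : List (List String)) :
    merge_origin_tags_py_alt o =
      (PySem.List.pyRange ((PySem.List.max? ((PySem.Set.ofList o.flatten).map
          (fun k => (List.count k o.flatten : Int))) (fun v => v)).getD 0) 0 (-1)).flatMap
        (fun c => (PySem.Set.ofList o.flatten).filter
          (fun t => (List.count t o.flatten : Int) == c)) := by
  have hcounts : (o.foldl (fun counts event_tags =>
      event_tags.foldl (fun (counts : PySem.Dict String Int) tag =>
        counts.insert tag (counts.getD tag 0 + 1)) counts) PySem.Dict.empty)
      = PySem.Dict.counter o.flatten := by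
    rw [← List.foldl_flatten]
    exact PySem.Dict.foldl_insert_getD_add_one_eq_counter _
  simp only [merge_origin_tags_py_alt]
  rw [hcounts]
  have hvals : (PySem.Dict.counter o.flatten).values
      = (PySem.Set.ofList o.flatten).map (fun k => (List.count k o.flatten : Int)) := by
    simp [PySem.Dict.values, PySem.Dict.items_counter, List.map_map, Function.comp_def]
  rw [hvals]
  rw [PySem.List.foldl_append_eq_flatMap, List.nil_append]
  congr 1
  funext c
  exact pv_buckets_getD o.flatten c

-- pairwise over a flatMap whose blocks are ordered by a strictly decreasing key
theorem pv_pairwise_flatMap {α : Type} (R : α → α → Prop) (cs : List Int) (g : Int → List α)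
    (hcs : cs.Pairwise (fun c c' => c' < c))
    (hin : ∀ c ∈ cs, (g c).Pairwise R)
    (hcross : ∀ c c', c' < c → ∀ a ∈ g c, ∀ b ∈ g c', R a b) :
    (cs.flatMap g).Pairwise R := by
  induction cs with
  | nil => simp
  | cons c cs ih =>
    rw [List.flatMap_cons, List.pairwise_append]
    obtain ⟨hhead, htail⟩ := List.pairwise_cons.mp hcs
    refine ⟨hin c (by simp), ih htail (fun c' hc' => hin c' (by simp [hc'])) , ?_⟩
    intro a ha b hb
    obtain ⟨c', hc', hbg⟩ := List.mem_flatMap.mp hb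
    exact hcross c c' (hhead c' hc') a ha b hbg

-- ===== VERDICT (by name: the statement is the Claim_ definition above) =====
theorem merge_origin_tags_py_spec : Claim_equal_merge_origin_tags_py := by
  intro o _
  show merge_origin_tags_py o = merge_origin_tags_py_alt o
  have hsplit : (o.foldl (fun st event_tags => event_tags.foldl
        (fun (st : PySem.Dict String Int × (PySem.Dict String Int × Int)) tag =>
          (st.1.insert tag (st.1.getD tag 0 + 1),
           if st.2.1.contains tag then st.2 else (st.2.1.insert tag st.2.2, st.2.2 + 1)))
        st) (PySem.Dict.empty, (PySem.Dict.empty, 0)))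
      = (PySem.Dict.counter o.flatten,
         o.flatten.foldl (fun (p : PySem.Dict String Int × Int) tag =>
           if p.1.contains tag then p else (p.1.insert tag p.2, p.2 + 1)) (PySem.Dict.empty, 0)) := by
    rw [← List.foldl_flatten]
    rw [show (fun (st : PySem.Dict String Int × (PySem.Dict String Int × Int)) tag =>
          (st.1.insert tag (st.1.getD tag 0 + 1),
           if st.2.1.contains tag then st.2 else (st.2.1.insert tag st.2.2, st.2.2 + 1)))
        = (fun (s : PySem.Dict String Int × (PySem.Dict String Int × Int)) e =>
            ((fun (d : PySem.Dict String Int) tag => d.insert tag (d.getD tag 0 + 1)) s.1 e,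
             (fun (p : PySem.Dict String Int × Int) tag =>
               if p.1.contains tag then p else (p.1.insert tag p.2, p.2 + 1)) s.2 e)) from rfl]
    rw [PySem.List.foldl_prod_mk
      (f := fun (d : PySem.Dict String Int) tag => d.insert tag (d.getD tag 0 + 1))
      (g := fun (p : PySem.Dict String Int × Int) tag =>
        if p.1.contains tag then p else (p.1.insert tag p.2, p.2 + 1))]
    rw [PySem.Dict.foldl_insert_getD_add_one_eq_counter]
  simp only [merge_origin_tags_py]
  rw [hsplit]
  simp only [PySem.Dict.keys_counter, PySem.Dict.getD_counter, PySem.List.sorted2,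
    Bool.false_eq_true, if_false]
  rw [pv_alt_eq_flatMap]
  set xs := o.flatten with hxs
  set S := PySem.Set.ofList xs with hSdef
  set fs := (List.foldl (fun (p : PySem.Dict String Int × Int) tag =>
      if p.1.contains tag then p else (p.1.insert tag p.2, p.2 + 1)) (PySem.Dict.empty, 0) xs) with hfsdef
  set mx := (PySem.List.max? (S.map (fun k => (List.count k xs : Int))) (fun v => v)).getD 0 with hmxdef
  have hk2 := pv_fs_inv xs
  have hcnt1 : ∀ t ∈ S, 1 ≤ (List.count t xs : Int) := by
    intro t ht
    have htx : t ∈ xs := (PySem.Set.mem_ofList _ _).mp ht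
    have := List.count_pos_iff.mpr htx
    exact_mod_cast this
  have hcntmx : ∀ t ∈ S, (List.count t xs : Int) ≤ mx := by
    intro t ht
    rcases hm : PySem.List.max? (S.map (fun k => (List.count k xs : Int))) (fun v => v) with _ | m
    · rw [PySem.List.max?_eq_none_iff] at hm
      rw [List.map_eq_nil_iff] at hm
      rw [hm] at ht
      cases ht
    · have hle := PySem.List.max?_isMax hm ((List.count t xs : Int))
        (List.mem_map_of_mem ht)
      rw [hmxdef, hm]
      simpa using hle
  have hk2pairs : S.Pairwise (fun a b => fs.1.getD a 0 < fs.1.getD b 0) := by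
    rw [List.pairwise_iff_getElem]
    intro i j hi hj hij
    rw [hk2 i S[i] (List.getElem?_eq_getElem hi), hk2 j S[j] (List.getElem?_eq_getElem hj)]
    exact_mod_cast hij
  have hcs : (PySem.List.pyRange mx 0 (-1)).Pairwise (fun c c' => c' < c) := by
    rw [PySem.List.pyRange_neg_one_eq_reverse, List.pairwise_reverse]
    exact PySem.List.pairwise_lt_pyRange_one _ _
  -- the pairwise property of B's bucket concatenation, for A's comparison function
  have hpw : (List.flatMap (fun c => List.filter (fun t => (List.count t xs : Int) == c) S)
        (PySem.List.pyRange mx 0 (-1))).Pairwise (fun a b =>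
        (decide (-(List.count a xs : Int) < -(List.count b xs : Int)) ||
          (!decide (-(List.count b xs : Int) < -(List.count a xs : Int)) &&
            decide (fs.1.getD a 0 < fs.1.getD b 0))) = true ∧
        (decide (-(List.count b xs : Int) < -(List.count a xs : Int)) ||
          (!decide (-(List.count a xs : Int) < -(List.count b xs : Int)) &&
            decide (fs.1.getD b 0 < fs.1.getD a 0))) = false) := by
    apply pv_pairwise_flatMap
    · exact hcs
    · intro c _
      have hfil : (List.filter (fun t => (List.count t xs : Int) == c) S).Pairwise
          (fun a b => fs.1.getD a 0 < fs.1.getD b 0) :=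
        hk2pairs.sublist List.filter_sublist
      rw [List.pairwise_iff_getElem] at hfil ⊢
      intro i j hi hj hij
      have hk2ij := hfil i j hi hj hij
      have hmema := List.getElem_mem (l := List.filter (fun t => (List.count t xs : Int) == c) S) hi
      have hmemb := List.getElem_mem (l := List.filter (fun t => (List.count t xs : Int) == c) S) hj
      rw [List.mem_filter] at hmema hmemb
      have hca : (List.count (List.filter (fun t => (List.count t xs : Int) == c) S)[i] xs : Int) = c := by
        simpa using hmema.2
      have hcb : (List.count (List.filter (fun t => (List.count t xs : Int) == c) S)[j] xs : Int) = c := by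
        simpa using hmemb.2
      refine ⟨?_, ?_⟩ <;>
        simp only [Bool.or_eq_true, Bool.and_eq_true, Bool.not_eq_true', Bool.or_eq_false_iff,
          Bool.and_eq_false_iff, Bool.not_eq_false', decide_eq_true_eq, decide_eq_false_iff_not,
          not_lt] <;>
        omega
    · intro c c' hlt a ha b hb
      rw [List.mem_filter] at ha hb
      have hca : (List.count a xs : Int) = c := by simpa using ha.2
      have hcb : (List.count b xs : Int) = c' := by simpa using hb.2
      refine ⟨?_, ?_⟩ <;>
        simp only [Bool.or_eq_true, Bool.and_eq_true, Bool.not_eq_true', Bool.or_eq_false_iff,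
          Bool.and_eq_false_iff, Bool.not_eq_false', decide_eq_true_eq, decide_eq_false_iff_not,
          not_lt] <;>
        omega
  have hndys : (List.flatMap (fun c => List.filter (fun t => (List.count t xs : Int) == c) S)
      (PySem.List.pyRange mx 0 (-1))).Nodup := by
    apply pv_pairwise_flatMap
    · exact hcs
    · intro c _
      exact (PySem.Set.nodup_ofList xs).sublist List.filter_sublist
    · intro c c' hlt a ha b hb
      rw [List.mem_filter] at ha hb
      have hca : (List.count a xs : Int) = c := by simpa using ha.2
      have hcb : (List.count b xs : Int) = c' := by simpa using hb.2
      intro heq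
      rw [heq] at hca
      omega
  have hperm : (List.flatMap (fun c => List.filter (fun t => (List.count t xs : Int) == c) S)
      (PySem.List.pyRange mx 0 (-1))).Perm S := by
    rw [List.perm_ext_iff_of_nodup hndys (PySem.Set.nodup_ofList xs)]
    intro a
    simp only [List.mem_flatMap, List.mem_filter, PySem.List.mem_pyRange_neg_one, beq_iff_eq]
    constructor
    · rintro ⟨c, _, haS, _⟩
      exact haS
    · intro haS
      exact ⟨(List.count a xs : Int), ⟨hcnt1 a haS, hcntmx a haS⟩, haS, rfl⟩
  exact pv_foldl_insertBy_eq _ _ _ hperm hpw
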